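-- pv_equiv track=rewrite | github.com/vk1010101/VehicleDamageAPI | damage_service.py | overall_recommendation
-- ===== SOURCE A (Python) =====
-- def overall_recommendation(reports: list[dict]) -> str:
--     """
--     Roll up per-image recommendations.
--     Reject > Investigate > Approve
--     """
--     rank = {"Approve": 0, "Investigate": 1, "Reject": 2}
--     best = "Approve"
--     for r in reports:
--         rec = r.get("claim_recommendation", "Approve")
--         if rank.get(rec, 0) > rank.get(best, 0):
--             best = rec
--     return best
-- ===== SOURCE B (Python) =====
-- def overall_recommendation(reports: list[dict]) -> str:
--     """
--     Roll up per-image recommendations.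
--     Reject > Investigate > Approve
--     """
--     recs = {r.get("claim_recommendation", "Approve") for r in reports}
--     if "Reject" in recs:
--         return "Reject"
--     if "Investigate" in recs:
--         return "Investigate"
--     return "Approve"
-- ===== Notes on version B (the rewrite author's own statement) =====
-- stated objective: simpler
-- what changed: Replaces the rank-dict running-max scan with materializing the set of recommendations once and returning by explicit priority membership tests (Reject, then Investigate, else Approve).
import Mathlib
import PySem

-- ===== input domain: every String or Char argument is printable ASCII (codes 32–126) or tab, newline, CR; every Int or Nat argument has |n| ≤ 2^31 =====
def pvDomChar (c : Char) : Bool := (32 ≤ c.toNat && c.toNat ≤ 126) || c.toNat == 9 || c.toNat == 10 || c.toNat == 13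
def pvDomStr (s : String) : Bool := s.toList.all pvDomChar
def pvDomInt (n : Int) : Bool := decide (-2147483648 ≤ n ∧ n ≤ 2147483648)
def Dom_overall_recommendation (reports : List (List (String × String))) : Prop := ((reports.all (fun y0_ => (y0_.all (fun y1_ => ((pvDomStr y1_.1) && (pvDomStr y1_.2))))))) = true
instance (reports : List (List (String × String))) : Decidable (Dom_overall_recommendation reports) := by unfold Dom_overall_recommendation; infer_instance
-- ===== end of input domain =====

-- ===== PORT A =====
-- B materializes the set of recommendations once and answers by ordered priority membership tests, instead of A's rank-dict running-max scan (objective: simpler).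
def overall_recommendation (reports : List (List (String × String))) : String :=
  let rank : PySem.Dict String Int :=
    PySem.Dict.mk [("Approve", 0), ("Investigate", 1), ("Reject", 2)]
  reports.foldl (fun best r =>
    let rec_ := PySem.Dict.getD (PySem.Dict.mk r) "claim_recommendation" "Approve"
    if PySem.Dict.getD rank rec_ 0 > PySem.Dict.getD rank best 0 then rec_ else best)
    "Approve"

-- ===== PORT B =====
def overall_recommendation_alt (reports : List (List (String × String))) : String :=
  let recs : PySem.Set String :=
    PySem.Set.ofList (reports.map (fun r =>
      PySem.Dict.getD (PySem.Dict.mk r) "claim_recommendation" "Approve"))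
  if PySem.Set.contains recs "Reject" then "Reject"
  else if PySem.Set.contains recs "Investigate" then "Investigate"
  else "Approve"

-- ===== PRECONDITION & SPEC =====
def Spec_overall_recommendation (reports : List (List (String × String))) (out : String) : Prop := out = overall_recommendation_alt reports
instance (reports : List (List (String × String))) (out : String) : Decidable (Spec_overall_recommendation reports out) := by unfold Spec_overall_recommendation; infer_instance

-- ===== CLAIM (what is proved, stated in full; the proofs are below) =====
def Claim_equal_overall_recommendation : Prop := ∀ (reports : List (List (String × String))), Dom_overall_recommendation reports → Spec_overall_recommendation reports (overall_recommendation reports)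

-- ===== LEMMAS AND PROOFS =====

def pvRec (r : List (String × String)) : String :=
  PySem.Dict.getD (PySem.Dict.mk r) "claim_recommendation" "Approve"

def pvRank : PySem.Dict String Int :=
  PySem.Dict.mk [("Approve", 0), ("Investigate", 1), ("Reject", 2)]

def pvStep (best : String) (r : List (String × String)) : String :=
  if PySem.Dict.getD pvRank (pvRec r) 0 > PySem.Dict.getD pvRank best 0 then pvRec r else best

lemma pvA_eq_fold (reports : List (List (String × String))) :
    overall_recommendation reports = reports.foldl pvStep "Approve" := rfl

lemma pvRank_getD (s : String) :
    PySem.Dict.getD pvRank s 0 =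
      if s = "Reject" then 2 else if s = "Investigate" then 1 else 0 := by
  by_cases h2 : s = "Reject"
  · subst h2; decide
  · by_cases h1 : s = "Investigate"
    · subst h1; decide
    · by_cases h0 : s = "Approve"
      · subst h0; decide
      · simp only [if_neg h2, if_neg h1]
        simp [pvRank, PySem.Dict.getD, PySem.Dict.get?,
          Ne.symm h2, Ne.symm h1, Ne.symm h0]

lemma pvFold_char (reports : List (List (String × String))) :
    ∀ best : String, best = "Approve" ∨ best = "Investigate" ∨ best = "Reject" →
    reports.foldl pvStep best =
      if best = "Reject" ∨ "Reject" ∈ reports.map pvRec then "Reject"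
      else if best = "Investigate" ∨ "Investigate" ∈ reports.map pvRec then "Investigate"
      else best := by
  induction reports with
  | nil =>
    intro best hb
    rcases hb with h | h | h <;> subst h <;> simp
  | cons r rs ih =>
    intro best hb
    simp only [List.foldl_cons, List.map_cons, List.mem_cons]
    by_cases hR : pvRec r = "Reject"
    · have hstep : pvStep best r = "Reject" := by
        rcases hb with h | h | h <;> subst h <;>
          simp [pvStep, pvRank_getD, hR]
      rw [hstep, ih "Reject" (by simp)]
      simp [hR]
    · by_cases hI : pvRec r = "Investigate"
      · rcases hb with h | h | h <;> subst h
        · have hstep : pvStep "Approve" r = "Investigate" := by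
            simp [pvStep, pvRank_getD, hI]
          rw [hstep, ih "Investigate" (by simp)]
          simp [hI]
        · have hstep : pvStep "Investigate" r = "Investigate" := by
            simp [pvStep, pvRank_getD, hI]
          rw [hstep, ih "Investigate" (by simp)]
          simp [hI]
        · have hstep : pvStep "Reject" r = "Reject" := by
            simp [pvStep, pvRank_getD, hI]
          rw [hstep, ih "Reject" (by simp)]
          simp
      · have hstep : pvStep best r = best := by
          rcases hb with h | h | h <;> subst h <;>
            simp [pvStep, pvRank_getD, hR, hI]
        rw [hstep, ih best hb]
        simp [Ne.symm hR, Ne.symm hI]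

lemma pvB_char (reports : List (List (String × String))) :
    overall_recommendation_alt reports =
      if "Reject" ∈ reports.map pvRec then "Reject"
      else if "Investigate" ∈ reports.map pvRec then "Investigate"
      else "Approve" := by
  show (if PySem.Set.contains (PySem.Set.ofList (reports.map pvRec)) "Reject" then "Reject"
        else if PySem.Set.contains (PySem.Set.ofList (reports.map pvRec)) "Investigate" then "Investigate"
        else "Approve") = _
  simp [PySem.Set.mem_ofList]

-- ===== VERDICT (by name: the statement is the Claim_ definition above) =====
theorem overall_recommendation_spec : Claim_equal_overall_recommendation := by
  intro reports _
  show overall_recommendation reports = overall_recommendation_alt reports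
  rw [pvA_eq_fold, pvFold_char reports "Approve" (Or.inl rfl), pvB_char]
  simp
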